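-- pv_equiv track=rewrite | github.com/HenryRocha/leetcode-problems | python/tests/coding_interviews/interviews/test_solution_interview_04.py | ground_truth
-- ===== SOURCE A (Python) =====
-- from collections import deque
--
-- def ground_truth(adj: list[list[int]], origin: int, dst: int):
--     n = len(adj)
--     visited = [False for _ in range(n)]
--     q = deque([origin])
--     while q:
--         i = q.popleft()
--         for j in range(n):
--             if not adj[i][j]:
--                 continue
--             if j == dst:
--                 return True
--             if not visited[j]:
--                 visited[j] = True
--                 q.append(j)
--     return False
-- ===== SOURCE B (Python) =====
-- def ground_truth(adj: list[list[int]], origin: int, dst: int):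
--     n = len(adj)
--     visited = [False] * n
--
--     def dfs(i):
--         for j in range(n):
--             if not adj[i][j]:
--                 continue
--             if j == dst:
--                 return True
--             if not visited[j]:
--                 visited[j] = True
--                 if dfs(j):
--                     return True
--         return False
--
--     return dfs(origin)
-- ===== Notes on version B (the rewrite author's own statement) =====
-- stated objective: alternative
-- what changed: Replaced the explicit FIFO deque + while-loop BFS by a recursive depth-first search with an inner dfs helper over the current node; the same visited list and the same dst-before-visited check order, but a completely different traversal order and control structure.
import Mathlib
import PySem

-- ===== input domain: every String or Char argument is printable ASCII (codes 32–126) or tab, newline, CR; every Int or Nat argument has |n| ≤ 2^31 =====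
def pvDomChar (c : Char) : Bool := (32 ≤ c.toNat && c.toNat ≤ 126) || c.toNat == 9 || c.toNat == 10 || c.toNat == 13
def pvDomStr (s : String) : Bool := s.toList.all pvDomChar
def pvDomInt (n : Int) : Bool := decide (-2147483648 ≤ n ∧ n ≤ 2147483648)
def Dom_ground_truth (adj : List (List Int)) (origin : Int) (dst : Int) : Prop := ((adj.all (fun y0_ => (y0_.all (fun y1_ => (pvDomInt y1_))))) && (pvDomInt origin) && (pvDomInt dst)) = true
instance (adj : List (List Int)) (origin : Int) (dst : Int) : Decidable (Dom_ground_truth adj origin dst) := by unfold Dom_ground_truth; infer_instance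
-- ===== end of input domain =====

-- B replaces A's FIFO-queue breadth-first search by a recursive depth-first search (objective:
-- alternative, same asymptotic cost); both programs return the identical boolean on Pre_.

-- ===== PORT A =====
-- inner `for j in range(n)` of the while-body: returns `none` for `return True`,
-- otherwise `some (visited, queue)` after marking/appending.
def gtScan (adj : List (List Int)) (dst : Int) (i : Int) :
    List Int → List Bool → List Int → Option (List Bool × List Int)
  | [], visited, q => some (visited, q)
  | j :: js, visited, q =>
    if ((PySem.List.pyGet? ((PySem.List.pyGet? adj i).getD []) j).getD 0) = 0 then
      gtScan adj dst i js visited q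
    else if j = dst then none
    else if ((PySem.List.pyGet? visited j).getD true) = false then
      gtScan adj dst i js (visited.set j.toNat true) (q ++ [j])
    else
      gtScan adj dst i js visited q

-- the `while q:` loop; fuel (adj.length + 2) is an upper bound on the number of
-- iterations (each iteration pops one element and every append marks a fresh node)
def gtLoop (adj : List (List Int)) (dst : Int) : Nat → List Bool → List Int → Bool
  | 0, _, _ => false
  | _ + 1, _, [] => false
  | fuel + 1, visited, i :: rest =>
    match gtScan adj dst i (PySem.List.pyRange 0 (adj.length : Int) 1) visited rest with
    | none => true
    | some (v', q') => gtLoop adj dst fuel v' q'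

def ground_truth (adj : List (List Int)) (origin : Int) (dst : Int) : Bool :=
  gtLoop adj dst (adj.length + 2) (List.replicate adj.length false) [origin]

-- ===== PORT B =====
-- the recursive `dfs` helper of Source B; `js` is the remaining part of `range(n)`,
-- `visited` is threaded through; fuel bounds the recursion depth (each recursive
-- call marks a previously unvisited node first, so countFalse visited suffices).
def dfsGo (adj : List (List Int)) (dst : Int) :
    Nat → Int → List Int → List Bool → Bool × List Bool
  | _, _, [], visited => (false, visited)
  | fuel, i, j :: js, visited =>
    if ((PySem.List.pyGet? ((PySem.List.pyGet? adj i).getD []) j).getD 0) = 0 then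
      dfsGo adj dst fuel i js visited
    else if j = dst then (true, visited)
    else if ((PySem.List.pyGet? visited j).getD true) = false then
      match fuel with
      | 0 => (false, visited.set j.toNat true)
      | fuel' + 1 =>
        match dfsGo adj dst fuel' j (PySem.List.pyRange 0 (adj.length : Int) 1) (visited.set j.toNat true) with
        | (true, v2) => (true, v2)
        | (false, v2) => dfsGo adj dst (fuel' + 1) i js v2
    else
      dfsGo adj dst fuel i js visited
  termination_by fuel _ js _ => (fuel, js.length)

def ground_truth_alt (adj : List (List Int)) (origin : Int) (dst : Int) : Bool :=
  (dfsGo adj dst adj.length origin (PySem.List.pyRange 0 (adj.length : Int) 1)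
    (List.replicate adj.length false)).1

-- ===== PRECONDITION & SPEC =====
-- Pre_ excludes inputs where A raises IndexError (origin out of range for a nonempty matrix) and
-- ragged nonempty matrices with a row shorter than len(adj), where which out-of-range cell is
-- touched first depends on traversal order, so A may return while B raises.
def Pre_ground_truth (adj : List (List Int)) (origin : Int) (dst : Int) : Prop :=
  adj = [] ∨
    (-(adj.length : Int) ≤ origin ∧ origin < (adj.length : Int) ∧
      ∀ row ∈ adj, adj.length ≤ row.length)
instance (adj : List (List Int)) (origin : Int) (dst : Int) : Decidable (Pre_ground_truth adj origin dst) := by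
  unfold Pre_ground_truth; infer_instance
def pvWitness_ground_truth : List (List Int) × Int × Int := ([[0, 1], [0, 0]], 0, 1)
def Spec_ground_truth (adj : List (List Int)) (origin : Int) (dst : Int) (out : Bool) : Prop := out = ground_truth_alt adj origin dst
instance (adj : List (List Int)) (origin : Int) (dst : Int) (out : Bool) : Decidable (Spec_ground_truth adj origin dst out) := by unfold Spec_ground_truth; infer_instance

-- ===== CLAIM (what is proved, stated in full; the proofs are below) =====
def Claim_equal_ground_truth : Prop := ∀ (adj : List (List Int)) (origin : Int) (dst : Int), Dom_ground_truth adj origin dst → Pre_ground_truth adj origin dst → Spec_ground_truth adj origin dst (ground_truth adj origin dst)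

-- ===== LEMMAS AND PROOFS =====

-- node index a Python int denotes after negative-index wraparound
def nrm (n : Nat) (i : Int) : Nat := if i < 0 then (i + n).toNat else i.toNat

-- the raw cell value both ports read for adj[i][j]
def cellI (adj : List (List Int)) (i j : Int) : Int :=
  (PySem.List.pyGet? ((PySem.List.pyGet? adj i).getD []) j).getD 0

-- spec-level edge / step / reachability over normalized Nat indices
def edgeN (adj : List (List Int)) (a b : Nat) : Prop := (adj.getD a []).getD b 0 ≠ 0
def stepN (adj : List (List Int)) (a b : Nat) : Prop := b < adj.length ∧ edgeN adj a b
def hitN (adj : List (List Int)) (dst : Int) (a : Nat) : Prop :=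
  0 ≤ dst ∧ dst < (adj.length : Int) ∧ edgeN adj a dst.toNat
def ReachN (adj : List (List Int)) (s a : Nat) : Prop := Relation.ReflTransGen (stepN adj) s a

def markedIn (v : List Bool) (a : Nat) : Prop := v.getD a false = true

def ClosedIn (adj : List (List Int)) (dst : Int) (v : List Bool) (a : Nat) : Prop :=
  ¬ hitN adj dst a ∧ ∀ b, stepN adj a b → markedIn v b

theorem nrm_lt {n : Nat} {i : Int} (h1 : -(n : Int) ≤ i) (h2 : i < n) : nrm n i < n := by
  unfold nrm; split <;> omega

theorem pyRow_eq (adj : List (List Int)) (i : Int) (h1 : -(adj.length : Int) ≤ i)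
    (h2 : i < (adj.length : Int)) :
    (PySem.List.pyGet? adj i).getD [] = adj.getD (nrm adj.length i) [] := by
  by_cases hi : i < 0
  · have hk1 : 0 < (-i).toNat := by omega
    have hk2 : (-i).toNat ≤ adj.length := by omega
    have hrw : i = -(((-i).toNat : Nat) : Int) := by omega
    rw [hrw, PySem.List.pyGet?_neg_natCast adj _ hk1 hk2]
    have hnrm : nrm adj.length (-(((-i).toNat : Nat) : Int)) = adj.length - (-i).toNat := by
      unfold nrm; split <;> omega
    rw [hnrm, List.getD_eq_getElem?_getD]
  · have hi' : 0 ≤ i := by omega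
    rw [PySem.List.pyGet?_of_nonneg adj hi']
    have hnrm : nrm adj.length i = i.toNat := by unfold nrm; split <;> omega
    rw [hnrm, List.getD_eq_getElem?_getD]

theorem cell_eq (adj : List (List Int)) {i j : Int}
    (hrows : ∀ row ∈ adj, adj.length ≤ row.length)
    (h1 : -(adj.length : Int) ≤ i) (h2 : i < (adj.length : Int))
    (hj1 : 0 ≤ j) (hj2 : j < (adj.length : Int)) :
    cellI adj i j = (adj.getD (nrm adj.length i) []).getD j.toNat 0 := by
  unfold cellI
  rw [pyRow_eq adj i h1 h2]
  set row := adj.getD (nrm adj.length i) [] with hrow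
  have hmem : row ∈ adj := by
    have hlt : nrm adj.length i < adj.length := nrm_lt h1 h2
    rw [hrow, List.getD_eq_getElem?_getD, List.getElem?_eq_getElem hlt]
    exact List.getElem_mem hlt
  have hlen : j.toNat < row.length := by
    have := hrows row hmem; omega
  rw [PySem.List.pyGet?_of_nonneg row hj1, List.getElem?_eq_getElem hlen,
    List.getD_eq_getElem?_getD, List.getElem?_eq_getElem hlen]

theorem cell_edge (adj : List (List Int)) {i j : Int}
    (hrows : ∀ row ∈ adj, adj.length ≤ row.length)
    (h1 : -(adj.length : Int) ≤ i) (h2 : i < (adj.length : Int))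
    (hj1 : 0 ≤ j) (hj2 : j < (adj.length : Int)) :
    cellI adj i j ≠ 0 ↔ edgeN adj (nrm adj.length i) j.toNat := by
  unfold edgeN; rw [cell_eq adj hrows h1 h2 hj1 hj2]

theorem visRead (v : List Bool) (j : Int) (h0 : 0 ≤ j) (hj : j.toNat < v.length) :
    (PySem.List.pyGet? v j).getD true = v.getD j.toNat false := by
  rw [PySem.List.pyGet?_of_nonneg v h0, List.getElem?_eq_getElem hj,
    List.getD_eq_getElem?_getD, List.getElem?_eq_getElem hj]
  rfl

theorem markedIn_set (v : List Bool) (a b : Nat) (ha : a < v.length) :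
    markedIn (v.set a true) b ↔ (b = a ∨ markedIn v b) := by
  unfold markedIn
  by_cases hba : b = a
  · subst hba
    rw [List.getD_eq_getElem?_getD, List.getElem?_set_self ha]
    simp
  · rw [List.getD_eq_getElem?_getD, List.getElem?_set_ne (by omega), ← List.getD_eq_getElem?_getD]
    simp [hba]

theorem marked_replicate (n a : Nat) : ¬ markedIn (List.replicate n false) a := by
  unfold markedIn
  rw [List.getD_eq_getElem?_getD, List.getElem?_replicate]
  split <;> simp

theorem count_false_set (v : List Bool) (a : Nat) (ha : a < v.length)
    (hf : v.getD a false = false) :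
    (v.set a true).count false + 1 = v.count false := by
  induction v generalizing a with
  | nil => simp at ha
  | cons x xs ih =>
    cases a with
    | zero =>
      have hx : x = false := by simpa using hf
      subst hx
      simp
    | succ a =>
      have ha' : a < xs.length := by simpa using ha
      have hf' : xs.getD a false = false := by simpa using hf
      have := ih a ha' hf'
      simp only [List.set, List.count_cons]
      omega

theorem count_false_pos (v : List Bool) (a : Nat) (ha : a < v.length)
    (hf : v.getD a false = false) : 0 < v.count false := by
  have hgf : v[a] = false := by
    rw [List.getD_eq_getElem?_getD, List.getElem?_eq_getElem ha] at hf
    simpa using hf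
  have : (false : Bool) ∈ v := hgf ▸ List.getElem_mem ha
  simpa [List.count_pos_iff] using this

theorem count_false_mono (v v' : List Bool) (hlen : v'.length = v.length)
    (hm : ∀ a, markedIn v a → markedIn v' a) : v'.count false ≤ v.count false := by
  induction v generalizing v' with
  | nil =>
    have : v' = [] := List.eq_nil_of_length_eq_zero (by simpa using hlen)
    simp [this]
  | cons x xs ih =>
    cases v' with
    | nil => simp at hlen
    | cons y ys =>
      have hlen' : ys.length = xs.length := by simpa using hlen
      have hm0 : x = true → y = true := by
        intro hx
        have := hm 0 (by simp [markedIn, hx])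
        simpa [markedIn] using this
      have hmt : ∀ a, markedIn xs a → markedIn ys a := by
        intro a hma
        have := hm (a + 1) (by simpa [markedIn] using hma)
        simpa [markedIn] using this
      have hih := ih ys hlen' hmt
      cases x
      · cases y
        · simpa using Nat.succ_le_succ hih
        · simp
          omega
      · have hy : y = true := hm0 rfl
        subst hy
        simpa using hih

theorem reach_subset {adj : List (List Int)} {s : Nat} (S : Nat → Prop) (hs : S s)
    (hcl : ∀ a b, S a → stepN adj a b → S b) : ∀ a, ReachN adj s a → S a := by
  intro a h
  induction h with
  | refl => exact hs
  | tail _ h2 ih => exact hcl _ _ ih h2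

theorem nrm_of_nonneg {n : Nat} {i : Int} (h : 0 ≤ i) : nrm n i = i.toNat := by
  unfold nrm; split <;> omega

theorem gtScan_none_iff (adj : List (List Int)) (dst i : Int) :
    ∀ (js : List Int) (v : List Bool) (q : List Int),
    (gtScan adj dst i js v q = none ↔ ∃ j ∈ js, cellI adj i j ≠ 0 ∧ j = dst) := by
  intro js
  induction js with
  | nil => intro v q; simp [gtScan]
  | cons j js ih =>
    intro v q
    simp only [gtScan]
    split_ifs with h1 h2 h3
    · rw [ih]
      constructor
      · rintro ⟨j', hj', h⟩; exact ⟨j', List.mem_cons_of_mem _ hj', h⟩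
      · rintro ⟨j', hj', hc, hd⟩
        rcases List.mem_cons.1 hj' with rfl | hmem
        · exact absurd h1 hc
        · exact ⟨j', hmem, hc, hd⟩
    · simp only [true_iff]
      exact ⟨j, List.mem_cons_self .., h1, h2⟩
    · rw [ih]
      constructor
      · rintro ⟨j', hj', h⟩; exact ⟨j', List.mem_cons_of_mem _ hj', h⟩
      · rintro ⟨j', hj', hc, hd⟩
        rcases List.mem_cons.1 hj' with rfl | hmem
        · exact absurd hd h2
        · exact ⟨j', hmem, hc, hd⟩
    · rw [ih]
      constructor
      · rintro ⟨j', hj', h⟩; exact ⟨j', List.mem_cons_of_mem _ hj', h⟩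
      · rintro ⟨j', hj', hc, hd⟩
        rcases List.mem_cons.1 hj' with rfl | hmem
        · exact absurd hd h2
        · exact ⟨j', hmem, hc, hd⟩

theorem gtScan_some (adj : List (List Int)) (dst i : Int) :
    ∀ (js : List Int) (v : List Bool) (q : List Int) (v' : List Bool) (q' : List Int),
    gtScan adj dst i js v q = some (v', q') →
    (∀ j ∈ js, 0 ≤ j ∧ j.toNat < v.length) →
    v'.length = v.length ∧
    (∀ a, markedIn v a → markedIn v' a) ∧
    (∀ a, markedIn v' a → markedIn v a ∨ (a : Int) ∈ q') ∧
    (∀ x ∈ q, x ∈ q') ∧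
    (∀ x ∈ q', x ∈ q ∨ (x ∈ js ∧ cellI adj i x ≠ 0 ∧ x ≠ dst)) ∧
    q'.length + v'.count false = q.length + v.count false ∧
    (∀ j ∈ js, cellI adj i j ≠ 0 → j ≠ dst → markedIn v' j.toNat) := by
  intro js
  induction js with
  | nil =>
    intro v q v' q' h hb
    simp only [gtScan, Option.some.injEq, Prod.mk.injEq] at h
    obtain ⟨rfl, rfl⟩ := h
    refine ⟨rfl, fun a ha => ha, fun a ha => Or.inl ha, fun x hx => hx,
      fun x hx => Or.inl hx, rfl, fun j hj => absurd hj (List.not_mem_nil)⟩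
  | cons j js ih =>
    intro v q v' q' h hb
    have hbt : ∀ j' ∈ js, 0 ≤ j' ∧ j'.toNat < v.length :=
      fun j' hj' => hb j' (List.mem_cons_of_mem _ hj')
    have hbj := hb j (List.mem_cons_self ..)
    simp only [gtScan] at h
    by_cases h1 : (PySem.List.pyGet? ((PySem.List.pyGet? adj i).getD []) j).getD 0 = 0
    · rw [if_pos h1] at h
      obtain ⟨L, M1, M2, Q1, Q2, cnt, S⟩ := ih v q v' q' h hbt
      refine ⟨L, M1, M2, Q1, ?_, cnt, ?_⟩
      · intro x hx
        rcases Q2 x hx with hx' | ⟨hmem, hc, hd⟩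
        · exact Or.inl hx'
        · exact Or.inr ⟨List.mem_cons_of_mem _ hmem, hc, hd⟩
      · intro j' hj' hc hd
        rcases List.mem_cons.1 hj' with rfl | hmem
        · exact absurd h1 hc
        · exact S j' hmem hc hd
    · rw [if_neg h1] at h
      by_cases h2 : j = dst
      · rw [if_pos h2] at h; exact absurd h (by simp)
      · rw [if_neg h2] at h
        by_cases h3 : (PySem.List.pyGet? v j).getD true = false
        · rw [if_pos h3] at h
          -- unvisited: mark j and append
          have hf : v.getD j.toNat false = false := by
            rw [← visRead v j hbj.1 hbj.2]; exact h3
          have hbt' : ∀ j' ∈ js, 0 ≤ j' ∧ j'.toNat < (v.set j.toNat true).length := by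
            simpa using hbt
          obtain ⟨L, M1, M2, Q1, Q2, cnt, S⟩ := ih (v.set j.toNat true) (q ++ [j]) v' q' h hbt'
          have hcast : ((j.toNat : Nat) : Int) = j := Int.toNat_of_nonneg hbj.1
          refine ⟨by simpa using L, ?_, ?_, ?_, ?_, ?_, ?_⟩
          · intro a ha
            exact M1 a ((markedIn_set v j.toNat a hbj.2).2 (Or.inr ha))
          · intro a ha
            rcases M2 a ha with hm2 | hq'
            · rcases (markedIn_set v j.toNat a hbj.2).1 hm2 with rfl | hm
              · exact Or.inr (by rw [hcast]; exact Q1 j (by simp))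
              · exact Or.inl hm
            · exact Or.inr hq'
          · intro x hx
            exact Q1 x (List.mem_append_left _ hx)
          · intro x hx
            rcases Q2 x hx with hx' | ⟨hmem, hc, hd⟩
            · rcases List.mem_append.1 hx' with hxq | hxj
              · exact Or.inl hxq
              · have : x = j := by simpa using hxj
                subst this
                exact Or.inr ⟨List.mem_cons_self .., h1, h2⟩
            · exact Or.inr ⟨List.mem_cons_of_mem _ hmem, hc, hd⟩
          · have hcf := count_false_set v j.toNat hbj.2 hf
            have hql : (q ++ [j]).length = q.length + 1 := by simp
            omega
          · intro j' hj' hc hd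
            rcases List.mem_cons.1 hj' with rfl | hmem
            · exact M1 _ ((markedIn_set v j'.toNat j'.toNat hbj.2).2 (Or.inl rfl))
            · exact S j' hmem hc hd
        · rw [if_neg h3] at h
          -- already visited
          have hv : markedIn v j.toNat := by
            unfold markedIn
            rw [← visRead v j hbj.1 hbj.2]
            revert h3; cases (PySem.List.pyGet? v j).getD true <;> simp
          obtain ⟨L, M1, M2, Q1, Q2, cnt, S⟩ := ih v q v' q' h hbt
          refine ⟨L, M1, M2, Q1, ?_, cnt, ?_⟩
          · intro x hx
            rcases Q2 x hx with hx' | ⟨hmem, hc, hd⟩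
            · exact Or.inl hx'
            · exact Or.inr ⟨List.mem_cons_of_mem _ hmem, hc, hd⟩
          · intro j' hj' hc hd
            rcases List.mem_cons.1 hj' with rfl | hmem
            · exact M1 _ hv
            · exact S j' hmem hc hd

theorem pyRange_bounds {n : Nat} {x : Int} (hx : x ∈ PySem.List.pyRange 0 (n : Int) 1) :
    0 ≤ x ∧ x < (n : Int) := PySem.List.mem_pyRange_one.1 hx

theorem gtLoop_true (adj : List (List Int)) (dst : Int) (s : Nat)
    (hrows : ∀ row ∈ adj, adj.length ≤ row.length) :
    ∀ (fuel : Nat) (v : List Bool) (q : List Int),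
    gtLoop adj dst fuel v q = true →
    v.length = adj.length →
    (∀ x ∈ q, -(adj.length : Int) ≤ x ∧ x < (adj.length : Int)) →
    (∀ x ∈ q, ReachN adj s (nrm adj.length x)) →
    (∀ a, markedIn v a → ReachN adj s a) →
    ∃ a, ReachN adj s a ∧ hitN adj dst a := by
  intro fuel
  induction fuel with
  | zero => intro v q h; simp [gtLoop] at h
  | succ fuel ih =>
    intro v q h hlen hq hqr hm
    cases q with
    | nil => simp [gtLoop] at h
    | cons i rest =>
      have hi := hq i (List.mem_cons_self ..)
      have hir := hqr i (List.mem_cons_self ..)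
      cases hsc : gtScan adj dst i (PySem.List.pyRange 0 (adj.length : Int) 1) v rest with
      | none =>
        obtain ⟨j, hjmem, hc, rfl⟩ := (gtScan_none_iff adj dst i _ v rest).1 hsc
        have hjb := pyRange_bounds hjmem
        exact ⟨nrm adj.length i, hir, hjb.1, hjb.2,
          (cell_edge adj hrows hi.1 hi.2 hjb.1 hjb.2).1 hc⟩
      | some p =>
        obtain ⟨v', q'⟩ := p
        have hbs : ∀ j ∈ PySem.List.pyRange 0 (adj.length : Int) 1, 0 ≤ j ∧ j.toNat < v.length := by
          intro j hj
          have := pyRange_bounds hj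
          constructor
          · exact this.1
          · omega
        obtain ⟨L, M1, M2, Q1, Q2, cnt, S⟩ := gtScan_some adj dst i _ v rest v' q' hsc hbs
        simp only [gtLoop, hsc] at h
        have hq' : ∀ x ∈ q', -(adj.length : Int) ≤ x ∧ x < (adj.length : Int) := by
          intro x hx
          rcases Q2 x hx with hx' | ⟨hmem, _, _⟩
          · exact hq x (List.mem_cons_of_mem _ hx')
          · have := pyRange_bounds hmem
            omega
        have hqr' : ∀ x ∈ q', ReachN adj s (nrm adj.length x) := by
          intro x hx
          rcases Q2 x hx with hx' | ⟨hmem, hc, _⟩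
          · exact hqr x (List.mem_cons_of_mem _ hx')
          · have hxb := pyRange_bounds hmem
            have hedge := (cell_edge adj hrows hi.1 hi.2 hxb.1 hxb.2).1 hc
            rw [nrm_of_nonneg hxb.1]
            exact Relation.ReflTransGen.tail hir ⟨by omega, hedge⟩
        refine ih v' q' h (by omega) hq' hqr' ?_
        intro a ha
        rcases M2 a ha with hma | haq
        · exact hm a hma
        · have := hqr' (a : Int) haq
          rwa [nrm_of_nonneg (Int.natCast_nonneg a), Int.toNat_natCast] at this

theorem gtLoop_false (adj : List (List Int)) (dst : Int) (s : Nat)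
    (hrows : ∀ row ∈ adj, adj.length ≤ row.length) :
    ∀ (fuel : Nat) (v : List Bool) (q : List Int),
    gtLoop adj dst fuel v q = false →
    q.length + v.count false < fuel →
    v.length = adj.length →
    (∀ x ∈ q, -(adj.length : Int) ≤ x ∧ x < (adj.length : Int)) →
    (∀ a, markedIn v a ∨ a = s →
        a ∈ q.map (nrm adj.length) ∨ ClosedIn adj dst v a) →
    ∀ a, ReachN adj s a → ¬ hitN adj dst a := by
  intro fuel
  induction fuel with
  | zero => intro v q _ hcnt; omega
  | succ fuel ih =>
    intro v q h hcnt hlen hq inv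
    cases q with
    | nil =>
      intro a hra hha
      have hS : ∀ b, ReachN adj s b → (markedIn v b ∨ b = s) := by
        refine reach_subset _ (Or.inr rfl) ?_
        intro a' b' hSa hstep
        rcases inv a' hSa with hmap | hcl
        · simp at hmap
        · exact Or.inl (hcl.2 b' hstep)
      rcases inv a (hS a hra) with hmap | hcl
      · simp at hmap
      · exact hcl.1 hha
    | cons i rest =>
      have hi := hq i (List.mem_cons_self ..)
      cases hsc : gtScan adj dst i (PySem.List.pyRange 0 (adj.length : Int) 1) v rest with
      | none => exact absurd h (by simp [gtLoop, hsc])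
      | some p =>
        obtain ⟨v', q'⟩ := p
        have hbs : ∀ j ∈ PySem.List.pyRange 0 (adj.length : Int) 1, 0 ≤ j ∧ j.toNat < v.length := by
          intro j hj
          have := pyRange_bounds hj
          exact ⟨this.1, by omega⟩
        obtain ⟨L, M1, M2, Q1, Q2, cnt, S⟩ := gtScan_some adj dst i _ v rest v' q' hsc hbs
        simp only [gtLoop, hsc] at h
        -- the popped node is completely scanned
        have hnohit : ¬ hitN adj dst (nrm adj.length i) := by
          rintro ⟨hd0, hdn, hedge⟩
          have hcell : cellI adj i dst ≠ 0 :=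
            (cell_edge adj hrows hi.1 hi.2 hd0 hdn).2 hedge
          have : gtScan adj dst i (PySem.List.pyRange 0 (adj.length : Int) 1) v rest = none :=
            (gtScan_none_iff adj dst i _ v rest).2
              ⟨dst, PySem.List.mem_pyRange_one.2 ⟨hd0, hdn⟩, hcell, rfl⟩
          rw [hsc] at this
          cases this
        have hclosedi : ClosedIn adj dst v' (nrm adj.length i) := by
          refine ⟨hnohit, ?_⟩
          intro b hstep
          obtain ⟨hbn, hedge⟩ := hstep
          have hb0 : (0 : Int) ≤ (b : Int) := Int.natCast_nonneg b
          have hbn' : ((b : Nat) : Int) < (adj.length : Int) := by omega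
          have hcell : cellI adj i (b : Int) ≠ 0 := by
            refine (cell_edge adj hrows hi.1 hi.2 hb0 hbn').2 ?_
            rwa [Int.toNat_natCast]
          have hbd : (b : Int) ≠ dst := by
            intro hbd
            refine hnohit ⟨by omega, by omega, ?_⟩
            have : dst.toNat = b := by omega
            rwa [this]
          have := S (b : Int) (PySem.List.mem_pyRange_one.2 ⟨hb0, hbn'⟩) hcell hbd
          rwa [Int.toNat_natCast] at this
        have inv' : ∀ a, markedIn v' a ∨ a = s →
            a ∈ q'.map (nrm adj.length) ∨ ClosedIn adj dst v' a := by
          intro a ha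
          by_cases hai : a = nrm adj.length i
          · exact Or.inr (hai ▸ hclosedi)
          · have key : markedIn v a ∨ a = s →
                a ∈ q'.map (nrm adj.length) ∨ ClosedIn adj dst v' a := by
              intro hold
              rcases inv a hold with hmap | hcl
              · rcases List.mem_map.1 hmap with ⟨x, hx, hnx⟩
                rcases List.mem_cons.1 hx with rfl | hxr
                · exact absurd hnx.symm hai
                · exact Or.inl (List.mem_map.2 ⟨x, Q1 x hxr, hnx⟩)
              · exact Or.inr ⟨hcl.1, fun b hb => M1 b (hcl.2 b hb)⟩
            rcases ha with hm' | rfl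
            · rcases M2 a hm' with hmv | hq'
              · exact key (Or.inl hmv)
              · exact Or.inl (List.mem_map.2 ⟨(a : Int), hq', by
                  rw [nrm_of_nonneg (Int.natCast_nonneg a), Int.toNat_natCast]⟩)
            · exact key (Or.inr rfl)
        have hq'b : ∀ x ∈ q', -(adj.length : Int) ≤ x ∧ x < (adj.length : Int) := by
          intro x hx
          rcases Q2 x hx with hx' | ⟨hmem, _, _⟩
          · exact hq x (List.mem_cons_of_mem _ hx')
          · have := pyRange_bounds hmem
            omega
        refine ih v' q' h ?_ (by omega) hq'b inv'
        simp only [List.length_cons] at hcnt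
        omega


theorem dfsGo_skip {adj : List (List Int)} {dst : Int} {fuel : Nat} {i j : Int}
    {js : List Int} {v : List Bool}
    (h1 : (PySem.List.pyGet? ((PySem.List.pyGet? adj i).getD []) j).getD 0 = 0) :
    dfsGo adj dst fuel i (j :: js) v = dfsGo adj dst fuel i js v := by
  cases fuel with
  | zero => rw [dfsGo.eq_2, if_pos h1]
  | succ f => rw [dfsGo.eq_3, if_pos h1]

theorem dfsGo_hit {adj : List (List Int)} {dst : Int} {fuel : Nat} {i : Int}
    {js : List Int} {v : List Bool}
    (h1 : ¬ (PySem.List.pyGet? ((PySem.List.pyGet? adj i).getD []) dst).getD 0 = 0) :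
    dfsGo adj dst fuel i (dst :: js) v = (true, v) := by
  cases fuel with
  | zero => rw [dfsGo.eq_2, if_neg h1, if_pos rfl]
  | succ f => rw [dfsGo.eq_3, if_neg h1, if_pos rfl]

theorem dfsGo_seen {adj : List (List Int)} {dst : Int} {fuel : Nat} {i j : Int}
    {js : List Int} {v : List Bool}
    (h1 : ¬ (PySem.List.pyGet? ((PySem.List.pyGet? adj i).getD []) j).getD 0 = 0)
    (h2 : ¬ j = dst) (h3 : ¬ (PySem.List.pyGet? v j).getD true = false) :
    dfsGo adj dst fuel i (j :: js) v = dfsGo adj dst fuel i js v := by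
  cases fuel with
  | zero => rw [dfsGo.eq_2, if_neg h1, if_neg h2, if_neg h3]
  | succ f => rw [dfsGo.eq_3, if_neg h1, if_neg h2, if_neg h3]

theorem dfsGo_mark_zero {adj : List (List Int)} {dst : Int} {i j : Int}
    {js : List Int} {v : List Bool}
    (h1 : ¬ (PySem.List.pyGet? ((PySem.List.pyGet? adj i).getD []) j).getD 0 = 0)
    (h2 : ¬ j = dst) (h3 : (PySem.List.pyGet? v j).getD true = false) :
    dfsGo adj dst 0 i (j :: js) v = (false, v.set j.toNat true) := by
  rw [dfsGo.eq_2, if_neg h1, if_neg h2, if_pos h3]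

theorem dfsGo_mark_succ_true {adj : List (List Int)} {dst : Int} {fuel' : Nat} {i j : Int}
    {js : List Int} {v v2 : List Bool}
    (h1 : ¬ (PySem.List.pyGet? ((PySem.List.pyGet? adj i).getD []) j).getD 0 = 0)
    (h2 : ¬ j = dst) (h3 : (PySem.List.pyGet? v j).getD true = false)
    (heq : dfsGo adj dst fuel' j (PySem.List.pyRange 0 (adj.length : Int) 1) (v.set j.toNat true) = (true, v2)) :
    dfsGo adj dst fuel'.succ i (j :: js) v = (true, v2) := by
  rw [dfsGo.eq_3, if_neg h1, if_neg h2, if_pos h3, heq]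

theorem dfsGo_mark_succ_false {adj : List (List Int)} {dst : Int} {fuel' : Nat} {i j : Int}
    {js : List Int} {v v2 : List Bool}
    (h1 : ¬ (PySem.List.pyGet? ((PySem.List.pyGet? adj i).getD []) j).getD 0 = 0)
    (h2 : ¬ j = dst) (h3 : (PySem.List.pyGet? v j).getD true = false)
    (heq : dfsGo adj dst fuel' j (PySem.List.pyRange 0 (adj.length : Int) 1) (v.set j.toNat true) = (false, v2)) :
    dfsGo adj dst fuel'.succ i (j :: js) v = dfsGo adj dst (fuel' + 1) i js v2 := by
  rw [dfsGo.eq_3, if_neg h1, if_neg h2, if_pos h3, heq]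

theorem dfsGo_sound (adj : List (List Int)) (dst : Int) (s : Nat)
    (hrows : ∀ row ∈ adj, adj.length ≤ row.length) :
    ∀ (fuel : Nat) (i : Int) (js : List Int) (v : List Bool),
    v.length = adj.length →
    -(adj.length : Int) ≤ i → i < (adj.length : Int) →
    (∀ j ∈ js, 0 ≤ j ∧ j < (adj.length : Int)) →
    ReachN adj s (nrm adj.length i) →
    (∀ a, markedIn v a → ReachN adj s a) →
    (dfsGo adj dst fuel i js v).2.length = adj.length ∧
    (∀ a, markedIn (dfsGo adj dst fuel i js v).2 a → ReachN adj s a) ∧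
    ((dfsGo adj dst fuel i js v).1 = true → ∃ a, ReachN adj s a ∧ hitN adj dst a) := by
  intro fuel i js v
  induction fuel, i, js, v using dfsGo.induct adj dst with
  | case1 fuel i v =>
    intro hlen _ _ _ _ hm
    simp only [dfsGo]
    exact ⟨hlen, hm, by simp⟩
  | case2 fuel i j js v h1 ih =>
    intro hlen hi1 hi2 hjs hre hm
    rw [dfsGo_skip h1]
    exact ih hlen hi1 hi2 (fun j' hj' => hjs j' (List.mem_cons_of_mem _ hj')) hre hm
  | case3 fuel i js v h1 =>
    intro hlen hi1 hi2 hjs hre hm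
    rw [dfsGo_hit h1]
    refine ⟨hlen, hm, fun _ => ?_⟩
    have hd := hjs dst (List.mem_cons_self ..)
    exact ⟨nrm adj.length i, hre, hd.1, hd.2,
      (cell_edge adj hrows hi1 hi2 hd.1 hd.2).1 h1⟩
  | case4 i j js v h1 h2 h3 =>
    intro hlen hi1 hi2 hjs hre hm
    rw [dfsGo_mark_zero h1 h2 h3]
    have hj := hjs j (List.mem_cons_self ..)
    have hjlt : j.toNat < v.length := by omega
    refine ⟨by simpa using hlen, ?_, by simp⟩
    intro a ha
    rcases (markedIn_set v j.toNat a hjlt).1 ha with rfl | hma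
    · refine Relation.ReflTransGen.tail hre ⟨by omega, ?_⟩
      have := (cell_edge adj hrows hi1 hi2 hj.1 hj.2).1 h1
      exact this
    · exact hm a hma
  | case5 i j js v h1 h2 h3 fuel' v2 heq ih =>
    intro hlen hi1 hi2 hjs hre hm
    rw [dfsGo_mark_succ_true h1 h2 h3 heq]
    have hj := hjs j (List.mem_cons_self ..)
    have hjlt : j.toNat < v.length := by omega
    have hreJ : ReachN adj s (nrm adj.length j) := by
      rw [nrm_of_nonneg hj.1]
      refine Relation.ReflTransGen.tail hre ⟨by omega, ?_⟩
      exact (cell_edge adj hrows hi1 hi2 hj.1 hj.2).1 h1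
    have hm' : ∀ a, markedIn (v.set j.toNat true) a → ReachN adj s a := by
      intro a ha
      rcases (markedIn_set v j.toNat a hjlt).1 ha with rfl | hma
      · rwa [nrm_of_nonneg hj.1] at hreJ
      · exact hm a hma
    obtain ⟨L, M, T⟩ := ih (by simpa using hlen) (by omega) hj.2
      (fun x hx => pyRange_bounds hx) hreJ hm'
    rw [heq] at L M T
    exact ⟨L, M, fun _ => T rfl⟩
  | case6 i j js v h1 h2 h3 fuel' v2 heq ih1 ih2 =>
    intro hlen hi1 hi2 hjs hre hm
    rw [dfsGo_mark_succ_false h1 h2 h3 heq]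
    have hj := hjs j (List.mem_cons_self ..)
    have hjlt : j.toNat < v.length := by omega
    have hreJ : ReachN adj s (nrm adj.length j) := by
      rw [nrm_of_nonneg hj.1]
      refine Relation.ReflTransGen.tail hre ⟨by omega, ?_⟩
      exact (cell_edge adj hrows hi1 hi2 hj.1 hj.2).1 h1
    have hm' : ∀ a, markedIn (v.set j.toNat true) a → ReachN adj s a := by
      intro a ha
      rcases (markedIn_set v j.toNat a hjlt).1 ha with rfl | hma
      · rwa [nrm_of_nonneg hj.1] at hreJ
      · exact hm a hma
    obtain ⟨L1, M1, _⟩ := ih1 (by simpa using hlen) (by omega) hj.2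
      (fun x hx => pyRange_bounds hx) hreJ hm'
    rw [heq] at L1 M1
    exact ih2 L1 hi1 hi2 (fun j' hj' => hjs j' (List.mem_cons_of_mem _ hj')) hre M1
  | case7 fuel i j js v h1 h2 h3 ih =>
    intro hlen hi1 hi2 hjs hre hm
    rw [dfsGo_seen h1 h2 h3]
    exact ih hlen hi1 hi2 (fun j' hj' => hjs j' (List.mem_cons_of_mem _ hj')) hre hm

theorem dfsGo_complete (adj : List (List Int)) (dst : Int)
    (hrows : ∀ row ∈ adj, adj.length ≤ row.length) :
    ∀ (fuel : Nat) (i : Int) (js : List Int) (v : List Bool),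
    v.length = adj.length →
    -(adj.length : Int) ≤ i → i < (adj.length : Int) →
    (∀ j ∈ js, 0 ≤ j ∧ j < (adj.length : Int)) →
    v.count false ≤ fuel →
    (dfsGo adj dst fuel i js v).1 = false →
    (dfsGo adj dst fuel i js v).2.length = adj.length ∧
    (∀ a, markedIn v a → markedIn (dfsGo adj dst fuel i js v).2 a) ∧
    (∀ j ∈ js, cellI adj i j ≠ 0 →
      j ≠ dst ∧ markedIn (dfsGo adj dst fuel i js v).2 j.toNat) ∧
    (∀ a, markedIn (dfsGo adj dst fuel i js v).2 a →
      markedIn v a ∨ ClosedIn adj dst (dfsGo adj dst fuel i js v).2 a) := by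
  intro fuel i js v
  induction fuel, i, js, v using dfsGo.induct adj dst with
  | case1 fuel i v =>
    intro hlen _ _ _ _ _
    simp only [dfsGo]
    exact ⟨hlen, fun a ha => ha, fun j hj => absurd hj (List.not_mem_nil),
      fun a ha => Or.inl ha⟩
  | case2 fuel i j js v h1 ih =>
    intro hlen hi1 hi2 hjs hcf hres
    rw [dfsGo_skip h1] at hres ⊢
    obtain ⟨L, M, S, N⟩ := ih hlen hi1 hi2
      (fun j' hj' => hjs j' (List.mem_cons_of_mem _ hj')) hcf hres
    refine ⟨L, M, ?_, N⟩
    intro j' hj' hc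
    rcases List.mem_cons.1 hj' with rfl | hmem
    · exact absurd h1 hc
    · exact S j' hmem hc
  | case3 fuel i js v h1 =>
    intro hlen hi1 hi2 hjs hcf hres
    rw [dfsGo_hit h1] at hres
    exact absurd hres (by simp)
  | case4 i j js v h1 h2 h3 =>
    intro hlen hi1 hi2 hjs hcf hres
    have hj := hjs j (List.mem_cons_self ..)
    have hjlt : j.toNat < v.length := by omega
    have hf : v.getD j.toNat false = false := by
      rw [← visRead v j hj.1 hjlt]; exact h3
    have := count_false_pos v j.toNat hjlt hf
    omega
  | case5 i j js v h1 h2 h3 fuel' v2 heq ih =>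
    intro hlen hi1 hi2 hjs hcf hres
    rw [dfsGo_mark_succ_true h1 h2 h3 heq] at hres
    exact absurd hres (by simp)
  | case6 i j js v h1 h2 h3 fuel' v2 heq ih1 ih2 =>
    intro hlen hi1 hi2 hjs hcf hres
    have hj := hjs j (List.mem_cons_self ..)
    have hjlt : j.toNat < v.length := by omega
    have hf : v.getD j.toNat false = false := by
      rw [← visRead v j hj.1 hjlt]; exact h3
    have hcfset := count_false_set v j.toNat hjlt hf
    have hres' : (dfsGo adj dst (fuel' + 1) i js v2).1 = false := by
      rwa [dfsGo_mark_succ_false h1 h2 h3 heq] at hres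
    obtain ⟨L1, M1, S1, N1⟩ := ih1 (by simpa using hlen) (by omega) hj.2
      (fun x hx => pyRange_bounds hx) (by omega) (by rw [heq])
    rw [heq] at L1 M1 S1 N1
    have hcf2 : v2.count false ≤ fuel' + 1 := by
      have := count_false_mono (v.set j.toNat true) v2 (by simp [L1, hlen]) M1
      have hset : (v.set j.toNat true).count false + 1 = v.count false := hcfset
      omega
    obtain ⟨L2, M2, S2, N2⟩ := ih2 L1 hi1 hi2
      (fun j' hj' => hjs j' (List.mem_cons_of_mem _ hj')) hcf2 hres'
    have hgoal : dfsGo adj dst fuel'.succ i (j :: js) v = dfsGo adj dst (fuel' + 1) i js v2 :=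
      dfsGo_mark_succ_false h1 h2 h3 heq
    rw [hgoal]
    have hmonoJ : ∀ a, markedIn (v.set j.toNat true) a →
        markedIn (dfsGo adj dst (fuel' + 1) i js v2).2 a :=
      fun a ha => M2 a (M1 a ha)
    have hclosedJ : ClosedIn adj dst (dfsGo adj dst (fuel' + 1) i js v2).2 j.toNat := by
      constructor
      · rintro ⟨hd0, hdn, hedge⟩
        have hcell : cellI adj j dst ≠ 0 := by
          refine (cell_edge adj hrows (by omega) hj.2 hd0 hdn).2 ?_
          rwa [nrm_of_nonneg hj.1]
        exact (S1 dst (PySem.List.mem_pyRange_one.2 ⟨hd0, hdn⟩) hcell).1 rfl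
      · intro b hstep
        obtain ⟨hbn, hedge⟩ := hstep
        have hb0 : (0 : Int) ≤ (b : Int) := Int.natCast_nonneg b
        have hbn' : ((b : Nat) : Int) < (adj.length : Int) := by omega
        have hcell : cellI adj j (b : Int) ≠ 0 := by
          refine (cell_edge adj hrows (by omega) hj.2 hb0 hbn').2 ?_
          rw [nrm_of_nonneg hj.1, Int.toNat_natCast]
          exact hedge
        have := (S1 (b : Int) (PySem.List.mem_pyRange_one.2 ⟨hb0, hbn'⟩) hcell).2
        rw [Int.toNat_natCast] at this
        exact M2 b this
    refine ⟨L2, ?_, ?_, ?_⟩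
    · intro a ha
      exact hmonoJ a ((markedIn_set v j.toNat a hjlt).2 (Or.inr ha))
    · intro j' hj' hc
      rcases List.mem_cons.1 hj' with rfl | hmem
      · exact ⟨h2, hmonoJ _ ((markedIn_set v j'.toNat j'.toNat hjlt).2 (Or.inl rfl))⟩
      · exact S2 j' hmem hc
    · intro a ha
      rcases N2 a ha with hv2 | hcl
      · rcases N1 a hv2 with hvset | hcl1
        · rcases (markedIn_set v j.toNat a hjlt).1 hvset with rfl | hva
          · exact Or.inr hclosedJ
          · exact Or.inl hva
        · exact Or.inr ⟨hcl1.1, fun b hb => M2 b (hcl1.2 b hb)⟩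
      · exact Or.inr hcl
  | case7 fuel i j js v h1 h2 h3 ih =>
    intro hlen hi1 hi2 hjs hcf hres
    have hj := hjs j (List.mem_cons_self ..)
    have hjlt : j.toNat < v.length := by omega
    have hv : markedIn v j.toNat := by
      unfold markedIn
      rw [← visRead v j hj.1 hjlt]
      revert h3; cases (PySem.List.pyGet? v j).getD true <;> simp
    rw [dfsGo_seen h1 h2 h3] at hres ⊢
    obtain ⟨L, M, S, N⟩ := ih hlen hi1 hi2
      (fun j' hj' => hjs j' (List.mem_cons_of_mem _ hj')) hcf hres
    refine ⟨L, M, ?_, N⟩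
    intro j' hj' hc
    rcases List.mem_cons.1 hj' with rfl | hmem
    · exact ⟨h2, M _ hv⟩
    · exact S j' hmem hc

-- ===== VERDICT (by name: the statement is the Claim_ definition above) =====
theorem ground_truth_spec : Claim_equal_ground_truth := by
  unfold Claim_equal_ground_truth
  intro adj origin dst _ hpre
  unfold Spec_ground_truth
  rcases hpre with rfl | ⟨h1, h2, hrows⟩
  · simp [ground_truth, ground_truth_alt, gtLoop, gtScan, dfsGo]
  · have hn : 0 < adj.length := by omega
    have hreplen : (List.replicate adj.length false).length = adj.length := by simp
    have hrepcnt : (List.replicate adj.length false).count false = adj.length := by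
      simp
    have hrngb : ∀ x ∈ PySem.List.pyRange 0 (adj.length : Int) 1,
        0 ≤ x ∧ x < (adj.length : Int) := fun x hx => pyRange_bounds hx
    have hm0 : ∀ a, markedIn (List.replicate adj.length false) a → ReachN adj (nrm adj.length origin) a :=
      fun a ha => absurd ha (marked_replicate _ _)
    cases hA : ground_truth adj origin dst <;> cases hB : ground_truth_alt adj origin dst
    · rfl
    · -- A = false, B = true : impossible
      exfalso
      unfold ground_truth_alt at hB
      obtain ⟨_, _, T⟩ := dfsGo_sound adj dst (nrm adj.length origin) hrows
        adj.length origin (PySem.List.pyRange 0 (adj.length : Int) 1)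
        (List.replicate adj.length false) hreplen h1 h2 hrngb
        Relation.ReflTransGen.refl hm0
      obtain ⟨a, hra, hha⟩ := T hB
      unfold ground_truth at hA
      refine gtLoop_false adj dst (nrm adj.length origin) hrows
        (adj.length + 2) (List.replicate adj.length false) [origin] hA
        (by simp only [List.length_cons, List.length_nil, hrepcnt]; omega) hreplen ?_ ?_ a hra hha
      · intro x hx
        have : x = origin := by simpa using hx
        subst this; exact ⟨h1, h2⟩
      · intro a' ha'
        rcases ha' with hma | rfl
        · exact absurd hma (marked_replicate _ _)
        · exact Or.inl (by simp)
    · -- A = true, B = false : impossible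
      exfalso
      unfold ground_truth at hA
      obtain ⟨a, hra, hha⟩ := gtLoop_true adj dst (nrm adj.length origin) hrows
        (adj.length + 2) (List.replicate adj.length false) [origin] hA hreplen
        (by intro x hx; have : x = origin := by simpa using hx
            subst this; exact ⟨h1, h2⟩)
        (by intro x hx; have : x = origin := by simpa using hx
            subst this; exact Relation.ReflTransGen.refl)
        hm0
      unfold ground_truth_alt at hB
      obtain ⟨_, _, S, N⟩ := dfsGo_complete adj dst hrows
        adj.length origin (PySem.List.pyRange 0 (adj.length : Int) 1)
        (List.replicate adj.length false) hreplen h1 h2 hrngb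
        (le_of_eq hrepcnt) hB
      set w := (dfsGo adj dst adj.length origin (PySem.List.pyRange 0 (adj.length : Int) 1)
        (List.replicate adj.length false)).2 with hw
      have hclosed : ∀ b, markedIn w b → ClosedIn adj dst w b := by
        intro b hb
        rcases N b hb with hrep | hcl
        · exact absurd hrep (marked_replicate _ _)
        · exact hcl
      have hS : ∀ b, ReachN adj (nrm adj.length origin) b →
          (markedIn w b ∨ b = nrm adj.length origin) := by
        refine reach_subset _ (Or.inr rfl) ?_
        intro a' b' hSa hstep
        obtain ⟨hbn, hedge⟩ := hstep
        rcases hSa with hma | rfl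
        · exact Or.inl ((hclosed a' hma).2 b' ⟨hbn, hedge⟩)
        · -- successor of the origin row: scanned by the top-level dfs call
          have hb0 : (0 : Int) ≤ (b' : Int) := Int.natCast_nonneg b'
          have hbn' : ((b' : Nat) : Int) < (adj.length : Int) := by omega
          have hcell : cellI adj origin (b' : Int) ≠ 0 := by
            refine (cell_edge adj hrows h1 h2 hb0 hbn').2 ?_
            rwa [Int.toNat_natCast]
          have := (S (b' : Int) (PySem.List.mem_pyRange_one.2 ⟨hb0, hbn'⟩) hcell).2
          rw [Int.toNat_natCast] at this
          exact Or.inl this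
      rcases hS a hra with hma | rfl
      · exact (hclosed a hma).1 hha
      · obtain ⟨hd0, hdn, hedge⟩ := hha
        have hcell : cellI adj origin dst ≠ 0 :=
          (cell_edge adj hrows h1 h2 hd0 hdn).2 hedge
        exact (S dst (PySem.List.mem_pyRange_one.2 ⟨hd0, hdn⟩) hcell).1 rfl
    · rfl
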